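-- pv_equiv track=rewrite | github.com/arcadecoffee/advent-2015 | day03/src.py | count_stops
-- ===== SOURCE A (Python) =====
-- from itertools import cycle
--
-- class Coordinates:
--     def __init__(self, x: int = 0, y: int = 0):
--         self.x, self.y = x, y
--
--     def __add__(self, other):
--         return self.__class__(x=self.x + other.x, y=self.y + other.y)
--
--     @property
--     def coords(self):
--         return self.x, self.y
--
-- def count_stops(directions: str, num_santas: int = 1) -> int:
--     direction_to_coords = {
--         '>': Coordinates(1, 0), '<': Coordinates(-1, 0),
--         '^': Coordinates(0, 1), 'v': Coordinates(0, -1)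
--     }
--
--     santas = []
--     for n in range(num_santas):
--         santas.append(Coordinates())
--     stops = {santas[0].coords}
--     santa_cycle = cycle(range(num_santas))
--
--     for d in directions:
--         santa = next(santa_cycle)
--         santas[santa] += direction_to_coords[d]
--         stops.add(santas[santa].coords)
--
--     return len(stops)
-- ===== SOURCE B (Python) =====
-- def count_stops(directions: str, num_santas: int = 1) -> int:
--     step = {'>': (1, 0), '<': (-1, 0), '^': (0, 1), 'v': (0, -1)}
--     stops = {(0, 0)}
--     for s in range(num_santas):
--         x = y = 0
--         for i in range(s, len(directions), num_santas):
--             dx, dy = step[directions[i]]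
--             x += dx
--             y += dy
--             stops.add((x, y))
--     return len(stops)
-- ===== Notes on version B (the rewrite author's own statement) =====
-- stated objective: simpler
-- what changed: B drops the Coordinates class, the santa position list and itertools.cycle: it walks each santa separately over the stride range(s, len(directions), num_santas), accumulating a plain (x, y) from a direction->(dx, dy) tuple dict into one shared stops set.
import Mathlib
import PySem

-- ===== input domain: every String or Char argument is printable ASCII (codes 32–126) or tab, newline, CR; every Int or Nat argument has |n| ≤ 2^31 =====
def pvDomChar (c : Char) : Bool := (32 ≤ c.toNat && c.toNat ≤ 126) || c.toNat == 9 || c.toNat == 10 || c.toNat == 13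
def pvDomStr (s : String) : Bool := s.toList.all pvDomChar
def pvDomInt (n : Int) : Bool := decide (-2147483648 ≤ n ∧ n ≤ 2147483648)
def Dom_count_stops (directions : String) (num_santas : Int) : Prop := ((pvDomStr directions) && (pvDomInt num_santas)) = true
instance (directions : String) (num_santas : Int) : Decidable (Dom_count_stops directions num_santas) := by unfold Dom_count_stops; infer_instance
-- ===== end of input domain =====

-- B replaces the Coordinates class, the santa list and itertools.cycle by one plain per-santa
-- walk over the stride range(s, len(directions), num_santas) into a shared stops set (simpler).

-- ===== PORT A =====
def csA_delta : PySem.Dict Char (Int × Int) :=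
  ((((PySem.Dict.empty).insert '>' (1, 0)).insert '<' (-1, 0)).insert '^' (0, 1)).insert 'v' (0, -1)

def csA_step (num_santas : Int) (st : Int × List (Int × Int) × PySem.Set (Int × Int)) (d : Char) :
    Int × List (Int × Int) × PySem.Set (Int × Int) :=
  let santa := PySem.Int.mod st.1 num_santas
  let dm := csA_delta.getD d ((0 : Int), (0 : Int))
  let cur := PySem.List.pyGetD st.2.1 santa ((0 : Int), (0 : Int))
  let upd := (cur.1 + dm.1, cur.2 + dm.2)
  (st.1 + 1, PySem.List.pySetD st.2.1 santa upd, st.2.2.add upd)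

def count_stops (directions : String) (num_santas : Int) : Int :=
  let santas : List (Int × Int) :=
    (PySem.List.pyRange 0 num_santas 1).foldl (fun acc _ => acc ++ [((0 : Int), (0 : Int))]) []
  match PySem.List.pyGet? santas 0 with
  | none => 0  -- IndexError on santas[0]: num_santas ≤ 0, outside Pre_
  | some c0 =>
      let r := directions.toList.foldl (csA_step num_santas)
                 (0, santas, PySem.Set.add PySem.Set.empty c0)
      PySem.Set.len r.2.2

-- ===== PORT B =====
def csB_dirs : PySem.Dict Char (Int × Int) :=
  ((((PySem.Dict.empty).insert '>' (1, 0)).insert '<' (-1, 0)).insert '^' (0, 1)).insert 'v' (0, -1)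

def csB_step (st : (Int × Int) × PySem.Set (Int × Int)) (c : Char) :
    (Int × Int) × PySem.Set (Int × Int) :=
  let dm := csB_dirs.getD c ((0 : Int), (0 : Int))
  let q := (st.1.1 + dm.1, st.1.2 + dm.2)
  (q, st.2.add q)

def count_stops_alt (directions : String) (num_santas : Int) : Int :=
  let l := directions.toList
  let stops :=
    (PySem.List.pyRange 0 num_santas 1).foldl
      (fun stops s =>
        ((PySem.List.pyRange s (l.length : Int) num_santas).foldl
            (fun st i => csB_step st (PySem.List.pyGetD l i ' '))
            (((0 : Int), (0 : Int)), stops)).2)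
      (PySem.Set.add PySem.Set.empty ((0 : Int), (0 : Int)))
  PySem.Set.len stops

-- ===== PRECONDITION & SPEC =====
-- Pre_ excludes exactly the inputs where A raises: num_santas ≤ 0 (IndexError on santas[0]) and
-- directions containing a character that is not one of the four direction keys (KeyError in the dict).
def Pre_count_stops (directions : String) (num_santas : Int) : Prop :=
  1 ≤ num_santas ∧ directions.toList.all (fun c => c ∈ (['>', '<', '^', 'v'] : List Char)) = true
instance (directions : String) (num_santas : Int) : Decidable (Pre_count_stops directions num_santas) := by
  unfold Pre_count_stops; infer_instance

def pvWitness_count_stops : String × Int := (">v", 2)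

def Spec_count_stops (directions : String) (num_santas : Int) (out : Int) : Prop :=
  out = count_stops_alt directions num_santas
instance (directions : String) (num_santas : Int) (out : Int) : Decidable (Spec_count_stops directions num_santas out) := by
  unfold Spec_count_stops; infer_instance

-- ===== CLAIM (what is proved, stated in full; the proofs are below) =====
def Claim_equal_count_stops : Prop := ∀ (directions : String) (num_santas : Int), Dom_count_stops directions num_santas → Pre_count_stops directions num_santas → Spec_count_stops directions num_santas (count_stops directions num_santas)

-- ===== LEMMAS AND PROOFS =====

-- the move of one direction character, as a plain function (proof-side view of both delta maps)
def csB_move (p : Int × Int) (c : Char) : Int × Int :=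
  if c = '>' then (p.1 + 1, p.2)
  else if c = '<' then (p.1 - 1, p.2)
  else if c = '^' then (p.1, p.2 + 1)
  else (p.1, p.2 - 1)

-- the characters of santa s among the first t characters of l (stride num_santas starting at s)
def csSub (l : List Char) (N s t : Int) : List Char :=
  (PySem.List.pyRange s t N).map (fun i => PySem.List.pyGetD l i ' ')

-- the successive positions visited while walking cs from p
def csTrail (p : Int × Int) : List Char → List (Int × Int)
  | [] => []
  | c :: cs => let q := csB_move p c; q :: csTrail q cs

-- A's santa table after the first t characters, expressed per santa
def csTab (l : List Char) (N t : Int) : List (Int × Int) :=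
  (PySem.List.pyRange 0 N 1).map (fun s => (csSub l N s t).foldl csB_move ((0 : Int), (0 : Int)))

-- membership predicate for the stops set after the first t characters
def csQ (l : List Char) (N t : Int) (x : Int × Int) : Prop :=
  x = ((0 : Int), (0 : Int)) ∨
    ∃ s ∈ PySem.List.pyRange 0 N 1, x ∈ csTrail ((0 : Int), (0 : Int)) (csSub l N s t)

lemma csA_move_eq (c : Char) (hc : c ∈ (['>', '<', '^', 'v'] : List Char)) (p : Int × Int) :
    (p.1 + (csA_delta.getD c ((0:Int),(0:Int))).1, p.2 + (csA_delta.getD c ((0:Int),(0:Int))).2)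
      = csB_move p c := by
  have h1 : csA_delta.getD '>' ((0:Int),(0:Int)) = (1, 0) := by decide
  have h2 : csA_delta.getD '<' ((0:Int),(0:Int)) = (-1, 0) := by decide
  have h3 : csA_delta.getD '^' ((0:Int),(0:Int)) = (0, 1) := by decide
  have h4 : csA_delta.getD 'v' ((0:Int),(0:Int)) = (0, -1) := by decide
  rcases (by simpa using hc : c = '>' ∨ c = '<' ∨ c = '^' ∨ c = 'v') with rfl | rfl | rfl | rfl <;>
    simp [h1, h2, h3, h4, csB_move, sub_eq_add_neg]

lemma csB_move_eq (c : Char) (hc : c ∈ (['>', '<', '^', 'v'] : List Char)) (p : Int × Int) :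
    (p.1 + (csB_dirs.getD c ((0:Int),(0:Int))).1, p.2 + (csB_dirs.getD c ((0:Int),(0:Int))).2)
      = csB_move p c := by
  have h1 : csB_dirs.getD '>' ((0:Int),(0:Int)) = (1, 0) := by decide
  have h2 : csB_dirs.getD '<' ((0:Int),(0:Int)) = (-1, 0) := by decide
  have h3 : csB_dirs.getD '^' ((0:Int),(0:Int)) = (0, 1) := by decide
  have h4 : csB_dirs.getD 'v' ((0:Int),(0:Int)) = (0, -1) := by decide
  rcases (by simpa using hc : c = '>' ∨ c = '<' ∨ c = '^' ∨ c = 'v') with rfl | rfl | rfl | rfl <;>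
    simp [h1, h2, h3, h4, csB_move, sub_eq_add_neg]

lemma csTrail_append_singleton (cs : List Char) (c : Char) (p : Int × Int) :
    csTrail p (cs ++ [c]) = csTrail p cs ++ [csB_move (cs.foldl csB_move p) c] := by
  induction cs generalizing p with
  | nil => simp [csTrail]
  | cons d cs ih => simp [csTrail, ih]

lemma csPairwise_pyRange (a b N : Int) (hN : 0 < N) :
    (PySem.List.pyRange a b N).Pairwise (· < ·) := by
  rw [PySem.List.pyRange_of_pos a b hN]
  rw [List.pairwise_map]
  refine List.pairwise_lt_range.imp ?_
  intro k k' h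
  have hk : (k : Int) < (k' : Int) := by exact_mod_cast h
  have := mul_lt_mul_of_pos_left hk hN
  omega

lemma csPyRange_empty (a b N : Int) (hN : 0 < N) (h : b ≤ a) :
    PySem.List.pyRange a b N = [] := by
  rw [PySem.List.pyRange_of_pos a b hN, if_neg (by omega)]
  simp

lemma csPyRange_succ (N s : Int) (t : Nat) (hN : 0 < N) (hs : 0 ≤ s) (hsN : s < N) :
    PySem.List.pyRange s ((t : Int) + 1) N =
      PySem.List.pyRange s (t : Int) N ++ (if (t : Int) % N = s then [(t : Int)] else []) := by
  by_cases hts : s ≤ (t : Int)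
  · have hmod : ((t : Int) % N = s) ↔ N ∣ ((t : Int) - s) := by
      constructor
      · intro h
        have h2 := Int.emod_add_mul_ediv (t : Int) N
        exact ⟨(t : Int) / N, by omega⟩
      · rintro ⟨k, hk⟩
        have ht : (t : Int) = N * k + s := by omega
        rw [ht, add_comm (N * k) s, Int.add_mul_emod_self_left]
        exact Int.emod_eq_of_lt hs hsN
    have hbnd : ∀ a ∈ PySem.List.pyRange s (t : Int) N, a < (t : Int) := by
      intro a ha
      exact ((PySem.List.mem_pyRange_iff_of_pos hN a).mp ha).2.1
    have hsorted : ∀ (u v : List Int), u.Pairwise (· < ·) → v.Pairwise (· < ·) →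
        (∀ x, x ∈ u ↔ x ∈ v) → u = v := by
      intro u v hu hv hm
      exact List.Perm.eq_of_pairwise (fun a b _ _ h1 h2 => le_antisymm h1 h2)
        (hu.imp le_of_lt) (hv.imp le_of_lt)
        ((List.perm_ext_iff_of_nodup hu.nodup hv.nodup).mpr hm)
    split_ifs with h
    · apply hsorted
      · exact csPairwise_pyRange _ _ _ hN
      · rw [List.pairwise_append]
        refine ⟨csPairwise_pyRange _ _ _ hN, by simp, ?_⟩
        intro a ha b hb
        simp only [List.mem_singleton] at hb
        subst hb
        exact hbnd a ha
      · intro x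
        rw [PySem.List.mem_pyRange_iff_of_pos hN, List.mem_append,
          PySem.List.mem_pyRange_iff_of_pos hN]
        simp only [List.mem_singleton]
        constructor
        · rintro ⟨hx1, hx2, hx3⟩
          by_cases hxt : x = (t : Int)
          · exact Or.inr hxt
          · exact Or.inl ⟨hx1, by omega, hx3⟩
        · rintro (⟨hx1, hx2, hx3⟩ | rfl)
          · exact ⟨hx1, by omega, hx3⟩
          · exact ⟨hts, by omega, hmod.mp h⟩
    · rw [List.append_nil]
      apply hsorted
      · exact csPairwise_pyRange _ _ _ hN
      · exact csPairwise_pyRange _ _ _ hN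
      · intro x
        rw [PySem.List.mem_pyRange_iff_of_pos hN, PySem.List.mem_pyRange_iff_of_pos hN]
        constructor
        · rintro ⟨hx1, hx2, hx3⟩
          refine ⟨hx1, ?_, hx3⟩
          by_cases hxt : x = (t : Int)
          · exact absurd (hmod.mpr (hxt ▸ hx3)) h
          · omega
        · rintro ⟨hx1, hx2, hx3⟩
          exact ⟨hx1, by omega, hx3⟩
  · have h1 : PySem.List.pyRange s ((t : Int) + 1) N = [] := csPyRange_empty _ _ _ hN (by omega)
    have h2 : PySem.List.pyRange s (t : Int) N = [] := csPyRange_empty _ _ _ hN (by omega)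
    have h3 : (t : Int) % N = (t : Int) := Int.emod_eq_of_lt (by omega) (by omega)
    rw [h1, h2, if_neg (by omega)]
    simp

lemma csSub_succ (l : List Char) (N s : Int) (t : Nat) (hN : 0 < N) (hs : 0 ≤ s) (hsN : s < N) :
    csSub l N s ((t : Int) + 1) =
      csSub l N s (t : Int) ++ (if (t : Int) % N = s then [PySem.List.pyGetD l (t : Int) ' '] else []) := by
  unfold csSub
  rw [csPyRange_succ N s t hN hs hsN, List.map_append]
  split_ifs <;> simp

lemma csB_inner (cs : List Char) (hcs : ∀ c ∈ cs, c ∈ (['>', '<', '^', 'v'] : List Char))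
    (p : Int × Int) (st : PySem.Set (Int × Int)) :
    cs.foldl csB_step (p, st) = (cs.foldl csB_move p, st.update (csTrail p cs)) := by
  induction cs generalizing p st with
  | nil => simp [csTrail, PySem.Set.update_nil]
  | cons c cs ih =>
      simp only [List.foldl_cons, csTrail]
      have hstep : csB_step (p, st) c = (csB_move p c, st.add (csB_move p c)) := by
        unfold csB_step
        simp only [csB_move_eq c (hcs c List.mem_cons_self) p]
      rw [hstep, ih (fun c hc => hcs c (List.mem_cons_of_mem _ hc)), PySem.Set.update_cons]

lemma csB_outer (l : List Char) (N : Int) (hN : 1 ≤ N)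
    (hvalid : ∀ c ∈ l, c ∈ (['>', '<', '^', 'v'] : List Char)) :
    ∀ (ss : List Int) (st : PySem.Set (Int × Int)),
      (∀ s ∈ ss, 0 ≤ s) →
      let r := ss.foldl
        (fun stops s =>
          ((PySem.List.pyRange s (l.length : Int) N).foldl
              (fun st i => csB_step st (PySem.List.pyGetD l i ' '))
              (((0 : Int), (0 : Int)), stops)).2) st
      (∀ x, x ∈ r ↔ x ∈ st ∨ ∃ s ∈ ss, x ∈ csTrail ((0:Int),(0:Int)) (csSub l N s (l.length : Int)))
        ∧ (st.Nodup → r.Nodup) := by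
  intro ss
  induction ss with
  | nil => intro st _; exact ⟨by simp, fun h => h⟩
  | cons s ss ih =>
      intro st hss
      have hsubv : ∀ c ∈ csSub l N s (l.length : Int), c ∈ (['>', '<', '^', 'v'] : List Char) := by
        intro c hc
        unfold csSub at hc
        obtain ⟨i, hi, rfl⟩ := List.mem_map.mp hc
        obtain ⟨hi1, hi2, _⟩ := (PySem.List.mem_pyRange_iff_of_pos (by omega) i).mp hi
        have hi0 : 0 ≤ i := le_trans (hss s List.mem_cons_self) hi1
        rw [PySem.List.pyGetD_eq_getElem l ' ' hi0 hi2]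
        exact hvalid _ (List.getElem_mem _)
      simp only [List.foldl_cons]
      have hstep : (List.foldl (fun st i => csB_step st (PySem.List.pyGetD l i ' '))
          (((0:Int),(0:Int)), st) (PySem.List.pyRange s (l.length : Int) N)).2
          = st.update (csTrail ((0:Int),(0:Int)) (csSub l N s (l.length : Int))) := by
        rw [← List.foldl_map (f := fun i => PySem.List.pyGetD l i ' ') (g := csB_step),
          show (List.map (fun i => PySem.List.pyGetD l i ' ')
              (PySem.List.pyRange s (l.length : Int) N)) = csSub l N s (l.length : Int) from rfl,
          csB_inner _ hsubv]
      rw [hstep]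
      have h := ih (st.update (csTrail ((0:Int),(0:Int)) (csSub l N s (l.length : Int))))
        (fun s' hs' => hss s' (List.mem_cons_of_mem _ hs'))
      refine ⟨?_, ?_⟩
      · intro x
        rw [(h.1 x : _), PySem.Set.mem_update]
        constructor
        · rintro ((hx | hx) | ⟨s', hs', hx⟩)
          · exact Or.inl hx
          · exact Or.inr ⟨s, by simp, hx⟩
          · exact Or.inr ⟨s', by simp [hs'], hx⟩
        · rintro (hx | ⟨s', hs', hx⟩)
          · exact Or.inl (Or.inl hx)
          · rcases List.mem_cons.mp hs' with rfl | hs'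
            · exact Or.inl (Or.inr hx)
            · exact Or.inr ⟨s', hs', hx⟩
      · intro hnd
        exact h.2 (PySem.Set.nodup_update _ _ hnd)

lemma csA_loop (l : List Char) (N : Int) (hN : 1 ≤ N)
    (hvalid : ∀ c ∈ l, c ∈ (['>', '<', '^', 'v'] : List Char)) :
    ∀ (cs : List Char) (t : Nat) (hts : l.drop t = cs) (htle : t ≤ l.length)
      (st : PySem.Set (Int × Int))
      (hmem : ∀ x, x ∈ st ↔ csQ l N (t : Int) x) (hnd : st.Nodup),
      (∀ x, x ∈ (cs.foldl (csA_step N) ((t : Int), csTab l N (t : Int), st)).2.2 ↔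
          csQ l N (l.length : Int) x)
        ∧ (cs.foldl (csA_step N) ((t : Int), csTab l N (t : Int), st)).2.2.Nodup := by
  intro cs
  induction cs with
  | nil =>
      intro t hts htle st hmem hnd
      have hlen : l.length ≤ t := by
        have := congrArg List.length hts
        simp at this
        omega
      have ht : t = l.length := le_antisymm htle hlen
      subst ht
      exact ⟨hmem, hnd⟩
  | cons c rest ih =>
      intro t hts htle st hmem hnd
      have htlt : t < l.length := by
        have := congrArg List.length hts
        simp at this
        omega
      have hc : l[t]'htlt = c := by
        have h0 : l[t + 0]? = some c := by
          rw [← List.getElem?_drop, hts]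
          rfl
        simp only [Nat.add_zero, List.getElem?_eq_getElem htlt, Option.some.injEq] at h0
        exact h0
      have hN0 : (0 : Int) < N := by omega
      have hs0 : (0 : Int) ≤ (t : Int) % N := Int.emod_nonneg _ (by omega)
      have hsN : (t : Int) % N < N := Int.emod_lt_of_pos _ hN0
      have hcv : c ∈ (['>', '<', '^', 'v'] : List Char) :=
        hvalid c (List.drop_subset t l (hts ▸ List.mem_cons_self))
      have hgetc : PySem.List.pyGetD l (t : Int) ' ' = c := by
        rw [PySem.List.pyGetD_natCast, List.getD_eq_getElem l ' ' htlt, hc]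
      have hcur : PySem.List.pyGetD (csTab l N (t : Int)) ((t : Int) % N) ((0:Int),(0:Int))
          = (csSub l N ((t : Int) % N) (t : Int)).foldl csB_move ((0:Int),(0:Int)) := by
        unfold csTab
        exact PySem.List.pyGetD_map_pyRange_of_nonneg _ N _ _ hs0 hsN
      set u : Int × Int :=
        csB_move ((csSub l N ((t : Int) % N) (t : Int)).foldl csB_move ((0:Int),(0:Int))) c with hu
      have hfold : (csSub l N ((t : Int) % N) ((t : Int) + 1)).foldl csB_move ((0:Int),(0:Int)) = u := by
        rw [csSub_succ l N _ t hN0 hs0 hsN, if_pos rfl, List.foldl_append, hgetc]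
        simp [hu]
      have htab : PySem.List.pySetD (csTab l N (t : Int)) ((t : Int) % N) u
          = csTab l N ((t : Int) + 1) := by
        rw [PySem.List.pySetD_of_nonneg _ u hs0]
        unfold csTab
        apply List.ext_getElem
        · simp
        · intro k h1 h2
          have hkN : (k : Int) < N := by
            simp [PySem.List.length_pyRange_one] at h2
            omega
          have hk0 : (0 : Int) ≤ (k : Int) := by positivity
          simp only [List.getElem_set, List.getElem_map, PySem.List.getElem_pyRange_one]
          by_cases hks : ((t : Int) % N).toNat = k
          · rw [if_pos hks]
            have hkk : (0 : Int) + (k : Int) = (t : Int) % N := by omega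
            rw [hkk]
            exact hfold.symm
          · rw [if_neg hks]
            have hne : (t : Int) % N ≠ (0 : Int) + (k : Int) := by omega
            rw [csSub_succ l N ((0:Int) + (k:Int)) t hN0 (by omega) (by omega), if_neg hne]
            simp
      have htr : ∀ sx, sx ∈ PySem.List.pyRange 0 N 1 →
          csTrail ((0:Int),(0:Int)) (csSub l N sx ((t : Int) + 1))
            = csTrail ((0:Int),(0:Int)) (csSub l N sx (t : Int))
              ++ (if (t : Int) % N = sx then [u] else []) := by
        intro sx hsx
        have hb := PySem.List.mem_pyRange_one.mp hsx
        rw [csSub_succ l N sx t hN0 hb.1 hb.2]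
        split_ifs with hcond
        · rw [csTrail_append_singleton, hgetc, ← hcond]
        · simp
      have hstep : csA_step N ((t : Int), csTab l N (t : Int), st) c
          = ((t : Int) + 1, csTab l N ((t : Int) + 1), st.add u) := by
        unfold csA_step
        simp only [PySem.Int.mod_eq_emod_of_pos hN0, hcur, csA_move_eq c hcv]
        rw [← hu, htab]
      have hmem' : ∀ x, x ∈ st.add u ↔ csQ l N ((t : Int) + 1) x := by
        intro x
        rw [PySem.Set.mem_add, hmem x]
        unfold csQ
        constructor
        · rintro ((h | ⟨sx, hsx, hx⟩) | rfl)
          · exact Or.inl h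
          · refine Or.inr ⟨sx, hsx, ?_⟩
            rw [htr sx hsx]
            exact List.mem_append_left _ hx
          · refine Or.inr ⟨(t : Int) % N, PySem.List.mem_pyRange_one.mpr ⟨hs0, hsN⟩, ?_⟩
            rw [htr _ (PySem.List.mem_pyRange_one.mpr ⟨hs0, hsN⟩), if_pos rfl]
            simp
        · rintro (h | ⟨sx, hsx, hx⟩)
          · exact Or.inl (Or.inl h)
          · rw [htr sx hsx] at hx
            rcases List.mem_append.mp hx with hx | hx
            · exact Or.inl (Or.inr ⟨sx, hsx, hx⟩)
            · split_ifs at hx with hcond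
              · simp only [List.mem_singleton] at hx
                exact Or.inr hx
              · simp at hx
      have hcast : ((t : Int) + 1) = ((t + 1 : Nat) : Int) := by push_cast; ring
      rw [List.foldl_cons, hstep, hcast]
      have hdrop : l.drop (t + 1) = rest := by
        have h0 : (List.drop t l).tail = List.drop (t + 1) l := List.tail_drop
        rw [hts] at h0
        simpa using h0.symm
      exact ih (t + 1) hdrop (by omega) (st.add u)
        (by rw [← hcast]; exact hmem') (PySem.Set.nodup_add st u hnd)

-- ===== VERDICT (by name: the statement is the Claim_ definition above) =====
theorem count_stops_spec : Claim_equal_count_stops := by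
  intro d n _ hpre
  rcases hpre with ⟨hN, hvalidb⟩
  have hvalid : ∀ c ∈ d.toList, c ∈ (['>', '<', '^', 'v'] : List Char) := by
    simpa using hvalidb
  unfold Spec_count_stops count_stops count_stops_alt
  have hsub0 : ∀ s ∈ PySem.List.pyRange 0 n 1, csSub d.toList n s (0 : Int) = [] := by
    intro s hs
    unfold csSub
    rw [csPyRange_empty _ _ _ (by omega) (PySem.List.mem_pyRange_one.mp hs).1]
    rfl
  have hsantas : (PySem.List.pyRange 0 n 1).foldl
      (fun acc _ => acc ++ [((0 : Int), (0 : Int))]) [] = csTab d.toList n 0 := by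
    rw [PySem.List.foldl_append_singleton_eq_map (fun _ => ((0 : Int), (0 : Int))) _ []]
    unfold csTab
    rw [List.nil_append]
    apply List.map_congr_left
    intro s hs
    rw [hsub0 s hs]
    rfl
  have hlen : 0 < (csTab d.toList n 0).length := by
    unfold csTab
    simp [PySem.List.length_pyRange_one]
    omega
  have hget : PySem.List.pyGet? (csTab d.toList n 0) 0 = some ((0 : Int), (0 : Int)) := by
    have h0 : PySem.List.pyGet? (csTab d.toList n 0) ((0 : Nat) : Int)
        = (csTab d.toList n 0)[(0 : Nat)]? := PySem.List.pyGet?_natCast _ 0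
    rw [show ((0 : Nat) : Int) = (0 : Int) from rfl] at h0
    rw [h0, List.getElem?_eq_getElem hlen]
    unfold csTab
    simp only [List.getElem_map, PySem.List.getElem_pyRange_one]
    rw [show csSub d.toList n (0 + (0:Nat)) 0 = [] from
      hsub0 _ (PySem.List.mem_pyRange_one.mpr ⟨by omega, by omega⟩)]
    rfl
  rw [hsantas]
  simp only [hget]
  have hm0 : ∀ x, x ∈ PySem.Set.add PySem.Set.empty ((0:Int),(0:Int)) ↔ csQ d.toList n (0:Int) x := by
    intro x
    rw [PySem.Set.mem_add]
    unfold csQ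
    constructor
    · rintro (h | rfl)
      · exact absurd h (by simp [PySem.Set.empty])
      · exact Or.inl rfl
    · rintro (rfl | ⟨sx, hsx, hx⟩)
      · exact Or.inr rfl
      · rw [hsub0 sx hsx] at hx
        cases hx
  have hnd0 : (PySem.Set.add PySem.Set.empty ((0:Int),(0:Int))).Nodup := by decide
  have hA := csA_loop d.toList n hN hvalid d.toList 0 (by simp) (by omega)
    (PySem.Set.add PySem.Set.empty ((0:Int),(0:Int))) (by simpa using hm0) hnd0
  simp only [Nat.cast_zero] at hA
  obtain ⟨hBm, hBn⟩ := csB_outer d.toList n hN hvalid (PySem.List.pyRange 0 n 1)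
    (PySem.Set.add PySem.Set.empty ((0:Int),(0:Int)))
    (fun s hs => (PySem.List.mem_pyRange_one.mp hs).1)
  unfold PySem.Set.len
  congr 1
  apply List.Perm.length_eq
  rw [List.perm_ext_iff_of_nodup (hA.2) (hBn hnd0)]
  intro x
  rw [hA.1 x, hBm x, hm0 x]
  unfold csQ
  constructor
  · rintro (h | h)
    · exact Or.inl (Or.inl h)
    · exact Or.inr h
  · rintro ((h | h) | h)
    · exact Or.inl h
    · obtain ⟨sx, hsx, hx⟩ := h
      rw [hsub0 sx hsx] at hx
      cases hx
    · exact Or.inr h
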